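-- pv_equiv track=rewrite | github.com/tangiraiC/passl | orders/batching/feasibility.py | _respects_precedence
-- ===== SOURCE A (Python) =====
-- from typing import Callable, Dict, List, Optional, Sequence, Tuple
--
-- def _respects_precedence(
--     perm: Tuple[int, ...],
--     pickup_index: Dict[str, int],
--     dropoff_index: Dict[str, int],
-- ) -> bool:
--     """
--     Check precedence constraints under the permutation of stop indices.
--     """
--     pos = {stop_idx: i for i, stop_idx in enumerate(perm)}
--     for order_id, pickup_idx in pickup_index.items():
--         dropoff_idx = dropoff_index[order_id]
--         if pos[pickup_idx] > pos[dropoff_idx]: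
--             return False
--     return True
-- ===== SOURCE B (Python) =====
-- def _respects_precedence(perm, pickup_index, dropoff_index):
--     # Group the dropoff stop of every order under its pickup stop, then do one
--     # right-to-left sweep: the first time a stop value is met (= its last
--     # occurrence) every dropoff hanging off it must already have been met
--     # (or be the same stop).
--     dropoffs_at = {}
--     for order_id, pickup_idx in pickup_index.items():
--         dropoffs_at.setdefault(pickup_idx, []).append(dropoff_index[order_id])
--     seen = set()
--     for stop in reversed(perm):
--         if stop in seen:
--             continue
--         for dropoff_idx in dropoffs_at.get(stop, []):
--             if dropoff_idx != stop and dropoff_idx not in seen: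
--                 return False
--         seen.add(stop)
--     return True
-- ===== Notes on version B (the rewrite author's own statement) =====
-- stated objective: alternative
-- what changed: Replaces the stop->position dict and the per-order position comparison by grouping each order's dropoff stop under its pickup stop and doing a single right-to-left sweep of the permutation with a seen-set; no position lookups or comparisons remain.
-- outside the precondition, e.g. on _respects_precedence((0, 1), {'x': 1, 'y': 2}, {'x': 0}): A returns False, B raises KeyError
import Mathlib
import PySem

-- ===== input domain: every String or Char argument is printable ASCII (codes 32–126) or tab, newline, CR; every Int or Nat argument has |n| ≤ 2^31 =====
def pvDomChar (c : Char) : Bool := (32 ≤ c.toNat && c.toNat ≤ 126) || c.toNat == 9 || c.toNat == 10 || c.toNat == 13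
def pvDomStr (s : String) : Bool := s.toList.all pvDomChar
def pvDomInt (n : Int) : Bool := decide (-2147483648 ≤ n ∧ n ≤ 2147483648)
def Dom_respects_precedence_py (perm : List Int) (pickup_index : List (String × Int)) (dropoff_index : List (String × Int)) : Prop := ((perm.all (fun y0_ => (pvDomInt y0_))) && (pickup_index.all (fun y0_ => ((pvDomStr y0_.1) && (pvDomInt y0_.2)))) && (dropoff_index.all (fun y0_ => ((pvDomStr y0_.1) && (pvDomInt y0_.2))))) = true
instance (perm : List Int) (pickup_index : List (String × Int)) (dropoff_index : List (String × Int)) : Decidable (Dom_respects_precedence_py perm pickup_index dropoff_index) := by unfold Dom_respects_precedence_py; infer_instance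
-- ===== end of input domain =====

-- B groups each order's dropoff stop under its pickup stop and checks precedence by one
-- right-to-left sweep of the permutation with a seen-set, instead of A's stop->position
-- dict and per-order position comparisons (alternative decomposition, same cost).


-- ===== PORT A =====
-- the 'for order_id, pickup_idx in pickup_index.items():' loop of A
def pvALoop (pos : PySem.Dict Int Int) (drop : PySem.Dict String Int) : List (String × Int) → Bool
  | [] => true
  | (o, p) :: rest =>
    match drop.get? o with
    | none => true            -- Python raises KeyError here (excluded by Pre_)
    | some dp =>
      match pos.get? p, pos.get? dp with
      | some ip, some idp => if ip > idp then false else pvALoop pos drop rest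
      | _, _ => true          -- Python raises KeyError here (excluded by Pre_)

def respects_precedence_py (perm : List Int) (pickup_index : List (String × Int)) (dropoff_index : List (String × Int)) : Bool :=
  -- pos = {stop_idx: i for i, stop_idx in enumerate(perm)}
  let pos : PySem.Dict Int Int :=
    (PySem.List.enumerate perm).foldl (fun d q => d.insert q.2 q.1) PySem.Dict.empty
  pvALoop pos (PySem.Dict.mk dropoff_index) pickup_index

-- ===== PORT B =====
-- B's grouping pass: dropoffs_at.setdefault(pickup_idx, []).append(dropoff_index[order_id])
def pvBGroup (drop : PySem.Dict String Int) : List (String × Int) → PySem.Dict Int (List Int) → Option (PySem.Dict Int (List Int))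
  | [], acc => some acc
  | (o, p) :: rest, acc =>
    match drop.get? o with
    | none => none            -- Python raises KeyError here (excluded by Pre_)
    | some dp => pvBGroup drop rest (acc.modify p [] (· ++ [dp]))

-- B's sweep: 'for stop in reversed(perm): …' with the seen-set
def pvBSweep (m : PySem.Dict Int (List Int)) : List Int → PySem.Set Int → Bool
  | [], _ => true
  | s :: rest, seen =>
    if seen.contains s then pvBSweep m rest seen
    else if (m.getD s []).all (fun dp => dp == s || seen.contains dp) then
      pvBSweep m rest (PySem.Set.add seen s)
    else false

def respects_precedence_py_alt (perm : List Int) (pickup_index : List (String × Int)) (dropoff_index : List (String × Int)) : Bool :=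
  match pvBGroup (PySem.Dict.mk dropoff_index) pickup_index PySem.Dict.empty with
  | none => true              -- Python raises KeyError here (excluded by Pre_)
  | some m => pvBSweep m perm.reverse PySem.Set.empty

-- ===== PRECONDITION & SPEC =====
-- Pre_ excludes inputs where some pickup order lacks a dropoff entry or a pickup/dropoff
-- stop is absent from perm: there A raises KeyError (or, when an earlier order already
-- violates precedence, A returns False while B raises during its grouping pass).
def Pre_respects_precedence_py (perm : List Int) (pickup_index : List (String × Int)) (dropoff_index : List (String × Int)) : Prop :=
  ∀ op ∈ pickup_index, op.2 ∈ perm ∧ ∃ dp ∈ perm, (PySem.Dict.mk dropoff_index).get? op.1 = some dp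
instance (perm : List Int) (pickup_index : List (String × Int)) (dropoff_index : List (String × Int)) : Decidable (Pre_respects_precedence_py perm pickup_index dropoff_index) := by unfold Pre_respects_precedence_py; infer_instance

def pvWitness_respects_precedence_py : List Int × (List (String × Int)) × (List (String × Int)) :=
  ([0, 1], [("a", 0)], [("a", 1)])

def Spec_respects_precedence_py (perm : List Int) (pickup_index : List (String × Int)) (dropoff_index : List (String × Int)) (out : Bool) : Prop := out = respects_precedence_py_alt perm pickup_index dropoff_index
instance (perm : List Int) (pickup_index : List (String × Int)) (dropoff_index : List (String × Int)) (out : Bool) : Decidable (Spec_respects_precedence_py perm pickup_index dropoff_index out) := by unfold Spec_respects_precedence_py; infer_instance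

-- ===== CLAIM (what is proved, stated in full; the proofs are below) =====
def Claim_equal_respects_precedence_py : Prop := ∀ (perm : List Int) (pickup_index : List (String × Int)) (dropoff_index : List (String × Int)), Dom_respects_precedence_py perm pickup_index dropoff_index → Pre_respects_precedence_py perm pickup_index dropoff_index → Spec_respects_precedence_py perm pickup_index dropoff_index (respects_precedence_py perm pickup_index dropoff_index)

-- ===== LEMMAS AND PROOFS =====

theorem pvPos_get_gen (l : List Int) : ∀ (st : Int) (d : PySem.Dict Int Int) (x : Int),
    ((PySem.List.enumerate l st).foldl (fun d q => d.insert q.2 q.1) d).get? x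
      = if x ∈ l then some (st + (l.length : Int) - 1 - (l.reverse.idxOf x : Int)) else d.get? x := by
  induction l with
  | nil => intro st d x; simp [PySem.List.enumerate]
  | cons a t ih =>
    intro st d x
    simp only [PySem.List.enumerate, List.foldl_cons]
    rw [ih (st + 1) (d.insert a st) x]
    by_cases hxt : x ∈ t
    · have hxr : x ∈ t.reverse := by simpa using hxt
      simp only [hxt, if_pos, List.mem_cons, or_true, List.reverse_cons,
        List.idxOf_append, hxr, if_pos, List.length_cons]
      congr 1; push_cast; ring
    · by_cases hxa : x = a
      · subst hxa
        have hxr : x ∉ t.reverse := by simpa using hxt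
        rw [if_neg hxt, PySem.Dict.get?_insert_self]
        rw [if_pos (by simp)]
        simp only [List.reverse_cons, List.idxOf_append, hxr,
          List.idxOf_cons_self, List.length_cons, List.length_reverse]
        congr 1; push_cast; omega
      · rw [if_neg hxt, PySem.Dict.get?_insert_of_ne _ _ hxa]
        rw [if_neg (by simp [hxa, hxt])]


theorem pvALoop_eq (perm : List Int) (drop : PySem.Dict String Int) :
    ∀ l : List (String × Int), (∀ op ∈ l, op.2 ∈ perm ∧ ∃ dp ∈ perm, drop.get? op.1 = some dp) →
    pvALoop ((PySem.List.enumerate perm).foldl (fun d q => d.insert q.2 q.1) PySem.Dict.empty) drop l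
      = decide (∀ op ∈ l, ∀ dp, drop.get? op.1 = some dp →
          perm.reverse.idxOf dp ≤ perm.reverse.idxOf op.2) := by
  intro l hl
  induction l with
  | nil => simp [pvALoop]
  | cons op rest ih =>
    obtain ⟨o, p⟩ := op
    obtain ⟨hp, dp, hdpm, hget⟩ := hl (o, p) (by simp)
    have hrest := fun q hq => hl q (List.mem_cons_of_mem _ hq)
    simp only [pvALoop, hget]
    rw [pvPos_get_gen, pvPos_get_gen, if_pos hp, if_pos hdpm]
    simp only []
    by_cases hgt : perm.reverse.idxOf p < perm.reverse.idxOf dp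
    · rw [if_pos (by push_cast; omega)]
      symm
      simp only [decide_eq_false_iff_not, not_forall]
      refine ⟨(o, p), by simp, dp, hget, ?_⟩
      have hh : ¬ (perm.reverse.idxOf dp ≤ perm.reverse.idxOf p) := by omega
      simpa using hh
    · rw [if_neg (by push_cast; omega), ih hrest]
      apply decide_eq_decide.mpr
      constructor
      · intro h q hq dq hdq
        rcases List.mem_cons.mp hq with h1 | h1
        · subst h1
          have h2 : dq = dp := (Option.some.inj (hget.symm.trans hdq)).symm
          subst h2
          simpa using Nat.le_of_not_lt hgt
        · exact h q h1 dq hdq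
      · intro h q hq dq hdq
        exact h q (List.mem_cons_of_mem _ hq) dq hdq

theorem pvBGroup_eq (drop : PySem.Dict String Int) :
    ∀ (l : List (String × Int)) (acc : PySem.Dict Int (List Int)),
    (∀ op ∈ l, ∃ dp, drop.get? op.1 = some dp) →
    pvBGroup drop l acc = some ((l.map (fun op => (op.2, (drop.get? op.1).getD 0))).foldl
      (fun d p => d.modify p.1 [] (· ++ [p.2])) acc) := by
  intro l
  induction l with
  | nil => intro acc _; simp [pvBGroup]
  | cons op rest ih =>
    intro acc h
    obtain ⟨o, p⟩ := op
    obtain ⟨dp, hget⟩ := h (o, p) (by simp)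
    simp only [pvBGroup, hget, List.map_cons, List.foldl_cons]
    rw [ih _ fun q hq => h q (List.mem_cons_of_mem _ hq)]
    simp [hget]


theorem pvOfList_append_singleton {α : Type} [BEq α] (l : List α) (x : α) :
    PySem.Set.ofList (l ++ [x]) = PySem.Set.add (PySem.Set.ofList l) x := by
  simp [PySem.Set.ofList_eq_foldl, List.foldl_append]


theorem pvSeen_contains (pre : List Int) (x : Int) :
    (PySem.Set.ofList pre).contains x = decide (x ∈ pre) := by
  rw [PySem.Set.contains_eq_decide]
  exact decide_eq_decide.mpr (PySem.Set.mem_ofList pre x)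


theorem pvBSweep_eq (m : PySem.Dict Int (List Int)) :
    ∀ (t pre : List Int),
    pvBSweep m t (PySem.Set.ofList pre) =
      decide (∀ s ∈ t, s ∉ pre → ∀ dp ∈ m.getD s [],
        dp = s ∨ (pre ++ t).idxOf dp < (pre ++ t).idxOf s) := by
  intro t
  induction t with
  | nil => intro pre; simp [pvBSweep]
  | cons s rest ih =>
    intro pre
    simp only [pvBSweep, pvSeen_contains]
    by_cases hs : s ∈ pre
    · rw [if_pos (by simpa using hs)]
      have hof : PySem.Set.ofList pre = PySem.Set.ofList (pre ++ [s]) := by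
        rw [pvOfList_append_singleton, PySem.Set.add, pvSeen_contains]
        simp [hs]
      rw [hof, ih (pre ++ [s])]
      apply decide_eq_decide.mpr
      have hr : (pre ++ [s]) ++ rest = pre ++ s :: rest := by simp
      rw [hr]
      constructor
      · intro h s' hs' hnp
        rcases List.mem_cons.mp hs' with h1 | h1
        · exact absurd (h1 ▸ hs) hnp
        · refine h s' h1 ?_
          intro hc
          rcases List.mem_append.mp hc with h2 | h2
          · exact hnp h2
          · simp at h2
            exact hnp (h2 ▸ hs)
      · intro h s' hs' hnp
        exact h s' (List.mem_cons_of_mem _ hs')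
          (fun c => hnp (List.mem_append.mpr (Or.inl c)))
    · rw [if_neg (by simpa using hs)]
      have hidxs : (pre ++ s :: rest).idxOf s = pre.length := by
        rw [List.idxOf_append, if_neg hs]
        simp
      have hmem_iff : ∀ dp : Int, dp ∈ pre ↔ (pre ++ s :: rest).idxOf dp < pre.length := by
        intro dp
        constructor
        · intro h1
          rw [List.idxOf_append, if_pos h1]
          exact List.idxOf_lt_length_of_mem h1
        · intro h1
          by_contra h2
          rw [List.idxOf_append, if_neg h2] at h1
          omega
      by_cases hchk : ∀ dp ∈ m.getD s [], dp = s ∨ dp ∈ pre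
      · rw [if_pos ?chk]
        case chk =>
          rw [List.all_eq_true]
          intro dp hdp
          rcases hchk dp hdp with h1 | h1
          · simp [h1]
          · simp [pvSeen_contains, h1]
        rw [← pvOfList_append_singleton, ih (pre ++ [s])]
        apply decide_eq_decide.mpr
        have hr : (pre ++ [s]) ++ rest = pre ++ s :: rest := by simp
        rw [hr]
        have hhead : ∀ dp ∈ m.getD s [],
            dp = s ∨ (pre ++ s :: rest).idxOf dp < (pre ++ s :: rest).idxOf s := by
          intro dp hdp
          rcases hchk dp hdp with h2 | h2
          · exact Or.inl h2
          · exact Or.inr (by rw [hidxs]; exact (hmem_iff dp).mp h2)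
        constructor
        · intro h s' hs' hnp
          rcases List.mem_cons.mp hs' with h1 | h1
          · exact h1 ▸ hhead
          · by_cases hss' : s' = s
            · exact hss' ▸ hhead
            · refine h s' h1 ?_
              intro hc
              rcases List.mem_append.mp hc with h2 | h2
              · exact hnp h2
              · simp at h2
                exact hss' h2
        · intro h s' hs' hnp
          exact h s' (List.mem_cons_of_mem _ hs')
            (fun c => hnp (List.mem_append.mpr (Or.inl c)))
      · rw [if_neg ?nchk]
        case nchk =>
          simp only [List.all_eq_true, not_forall]
          push_neg at hchk
          obtain ⟨dp, hdp, hne, hnp⟩ := hchk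
          refine ⟨dp, hdp, ?_⟩
          simp [pvSeen_contains, hne, hnp]
        symm
        simp only [decide_eq_false_iff_not, not_forall]
        push_neg at hchk
        obtain ⟨dp, hdp, hne, hnp⟩ := hchk
        refine ⟨s, by simp, hs, dp, hdp, ?_⟩
        push_neg
        refine ⟨hne, ?_⟩
        rw [hidxs, List.idxOf_append, if_neg hnp]
        omega

-- both characterisations agree: assemble the equivalence
theorem respects_precedence_py_eq (perm : List Int) (pickup_index : List (String × Int)) (dropoff_index : List (String × Int))
    (hpre : Pre_respects_precedence_py perm pickup_index dropoff_index) :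
    respects_precedence_py perm pickup_index dropoff_index
      = respects_precedence_py_alt perm pickup_index dropoff_index := by
  have hpre' : ∀ op ∈ pickup_index, op.2 ∈ perm ∧
      ∃ dp ∈ perm, (PySem.Dict.mk dropoff_index).get? op.1 = some dp := hpre
  unfold respects_precedence_py respects_precedence_py_alt
  rw [pvALoop_eq perm (PySem.Dict.mk dropoff_index) pickup_index hpre']
  rw [pvBGroup_eq _ _ _ (fun op hop => ((hpre' op hop).2).elim (fun dp h => ⟨dp, h.2⟩))]
  simp only []
  have hempty : (PySem.Set.empty : PySem.Set Int) = PySem.Set.ofList [] := rfl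
  rw [hempty, show perm.reverse = [] ++ perm.reverse from rfl]
  rw [pvBSweep_eq]
  set r := perm.reverse with hrdef
  have hmemr : ∀ x : Int, x ∈ perm → x ∈ r := fun x hx => by
    rw [hrdef]; exact List.mem_reverse.mpr hx
  have hgetm : ∀ s : Int,
      ((pickup_index.map (fun op => (op.2, ((PySem.Dict.mk dropoff_index).get? op.1).getD 0))).foldl
        (fun d p => d.modify p.1 [] (· ++ [p.2])) PySem.Dict.empty).getD s []
      = ((pickup_index.map (fun op => (op.2, ((PySem.Dict.mk dropoff_index).get? op.1).getD 0))).filter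
          (fun q => q.1 == s)).map (fun q => q.2) := by
    intro s
    rw [PySem.Dict.getD_foldl_modify_append, PySem.Dict.getD_empty]
    simp
  have hle_iff : ∀ a b : Int, a ∈ r → b ∈ r →
      (r.idxOf a ≤ r.idxOf b ↔ (a = b ∨ r.idxOf a < r.idxOf b)) := by
    intro a b ha hb
    constructor
    · intro h1
      rcases Nat.lt_or_ge (r.idxOf a) (r.idxOf b) with h2 | h2
      · exact Or.inr h2
      · left
        have heq : r.idxOf a = r.idxOf b := Nat.le_antisymm h1 h2
        have hla := List.idxOf_lt_length_of_mem ha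
        have hlb := List.idxOf_lt_length_of_mem hb
        calc a = r[r.idxOf a] := (List.getElem_idxOf hla).symm
          _ = r[r.idxOf b] := by simp [heq]
          _ = b := List.getElem_idxOf hlb
    · intro h1
      rcases h1 with h1 | h1
      · subst h1; exact Nat.le_refl _
      · exact Nat.le_of_lt h1
  apply decide_eq_decide.mpr
  constructor
  · -- A's per-order condition implies B's sweep condition
    intro h s hsr _ dp hdp
    rw [hgetm] at hdp
    simp only [List.mem_map, List.mem_filter, List.mem_map] at hdp
    obtain ⟨q, ⟨⟨op, hop, hq⟩, hq1⟩, hq2⟩ := hdp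
    subst hq
    obtain ⟨hpm, dp0, hdp0m, hget0⟩ := hpre' op hop
    rw [hget0] at hq1 hq2
    simp only [Option.getD_some] at hq1 hq2
    have hs_eq : op.2 = s := by simpa using hq1
    subst hq2
    have hle := h op hop dp0 hget0
    simp only [List.nil_append] at hle ⊢
    rw [hs_eq] at hle
    exact (hle_iff dp0 s (hmemr dp0 hdp0m) (hs_eq ▸ hmemr _ hpm)).mp hle
  · -- B's sweep condition implies A's per-order condition
    intro h op hop dp hget
    obtain ⟨hpm, dp0, hdp0m, hget0⟩ := hpre' op hop
    have hdp_eq : dp = dp0 := Option.some.inj (hget.symm.trans hget0)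
    subst hdp_eq
    have hdpm : dp ∈ (((pickup_index.map (fun op => (op.2, ((PySem.Dict.mk dropoff_index).get? op.1).getD 0))).foldl
        (fun d p => d.modify p.1 [] (· ++ [p.2])) PySem.Dict.empty).getD op.2 []) := by
      rw [hgetm]
      simp only [List.mem_map, List.mem_filter, List.mem_map]
      exact ⟨(op.2, dp), ⟨⟨op, hop, by simp [hget0]⟩, by simp⟩, rfl⟩
    have h2 := h op.2 (by simpa using hmemr _ hpm) (by simp) dp hdpm
    simp only [List.nil_append] at h2 ⊢
    exact (hle_iff dp op.2 (hmemr _ hdp0m) (hmemr _ hpm)).mpr h2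

-- ===== VERDICT (by name: the statement is the Claim_ definition above) =====
theorem respects_precedence_py_spec : Claim_equal_respects_precedence_py := by
  intro perm pickup_index dropoff_index _ hpre
  unfold Spec_respects_precedence_py
  exact respects_precedence_py_eq perm pickup_index dropoff_index hpre
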